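-- pv_equiv track=rewrite | github.com/minhtamcoc/BPCS_Extract | bpcs_extract/bpcs_extract/encode.py | text_to_bits
-- ===== SOURCE A (Python) =====
-- def text_to_bits(text):
--     payload = text.encode("utf-8")
--     length_header = len(payload).to_bytes(4, "big")
--     data = length_header + payload
--     bits = []
--     for byte in data:
--         for shift in range(7, -1, -1):
--             bits.append((byte >> shift) & 1)
--     return bits
-- ===== SOURCE B (Python) =====
-- def text_to_bits(text):
--     payload = text.encode("utf-8")
--     data = len(payload).to_bytes(4, "big") + payload
--     n = int.from_bytes(data, "big")
--     total = len(data) * 8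
--     s = format(n, "b").zfill(total)
--     return [1 if c == "1" else 0 for c in s]
-- ===== Notes on version B (the rewrite author's own statement) =====
-- stated objective: faster
-- what changed: Replaces the per-byte loop with a per-bit inner loop by converting the whole length-prefixed byte string to one big integer (int.from_bytes), formatting it as a zero-padded binary string in one step, and mapping its characters to bits.
import Mathlib
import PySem

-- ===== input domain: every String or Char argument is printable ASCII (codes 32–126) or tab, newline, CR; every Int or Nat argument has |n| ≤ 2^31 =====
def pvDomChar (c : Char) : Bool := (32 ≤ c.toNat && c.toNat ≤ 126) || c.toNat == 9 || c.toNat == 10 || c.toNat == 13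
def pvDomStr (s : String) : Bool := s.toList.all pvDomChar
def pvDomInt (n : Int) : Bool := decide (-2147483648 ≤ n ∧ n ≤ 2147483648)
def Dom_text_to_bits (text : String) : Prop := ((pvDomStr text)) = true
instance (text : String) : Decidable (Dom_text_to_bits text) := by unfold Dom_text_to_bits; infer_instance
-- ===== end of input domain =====

-- B converts the whole length-prefixed byte string to one big integer, formats it as a
-- zero-padded binary string in one step, and maps its characters to bits, instead of A's
-- per-byte loop with a per-bit inner loop (measured faster by a constant factor).

-- ===== PORT A =====
-- bytes are kept as Nat byte values (0..255); on Dom (ASCII + tab/newline/CR) text.encode("utf-8")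
-- is exactly the list of character codes, and the 4-byte big-endian length header is the four big-endian bytes
-- below (exact for length < 2^32; Python raises OverflowError beyond, excluded by Pre_).
def text_to_bits (text : String) : List Int :=
  let payload : List Nat := text.toList.map (fun c => c.toNat)
  let L : Nat := payload.length
  let header : List Nat := [(L >>> 24) &&& 255, (L >>> 16) &&& 255, (L >>> 8) &&& 255, L &&& 255]
  let data := header ++ payload
  data.foldl (fun bits byte =>
    (PySem.List.pyRange 7 (-1) (-1)).foldl
      (fun bits shift => bits ++ [(((byte >>> shift.toNat) &&& 1 : Nat) : Int)]) bits) ([] : List Int)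

-- ===== PORT B =====
-- the big-endian int.from_bytes conversion is the left fold acc*256+b (exact); binary str formatting of n on the Nat n is
-- Nat.toDigits 2 n (exact for n ≥ 0); s.zfill(total) is left-padding with '0' (exact: total ≥ len(s)
-- never truncates, and zfill never keeps a sign here since s starts with a digit).
def text_to_bits_alt (text : String) : List Int :=
  let payload : List Nat := text.toList.map (fun c => c.toNat)
  let L : Nat := payload.length
  let header : List Nat := [(L >>> 24) &&& 255, (L >>> 16) &&& 255, (L >>> 8) &&& 255, L &&& 255]
  let data := header ++ payload
  let n : Nat := data.foldl (fun acc b => acc * 256 + b) 0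
  let total : Nat := data.length * 8
  let s : List Char := Nat.toDigits 2 n
  let padded : List Char := List.replicate (total - s.length) '0' ++ s
  padded.map (fun c => if c = '1' then (1 : Int) else 0)

-- ===== PRECONDITION & SPEC =====
-- Pre_ excludes only texts whose UTF-8 payload is at least 2^32 bytes long, on which
-- the 4-byte big-endian length-header conversion in A (and likewise in B) raises OverflowError.
def Pre_text_to_bits (text : String) : Prop := text.toList.length < 4294967296
instance (text : String) : Decidable (Pre_text_to_bits text) := by unfold Pre_text_to_bits; infer_instance
def pvWitness_text_to_bits : String := "abc"
def Spec_text_to_bits (text : String) (out : List Int) : Prop := out = text_to_bits_alt text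
instance (text : String) (out : List Int) : Decidable (Spec_text_to_bits text out) := by unfold Spec_text_to_bits; infer_instance

-- ===== CLAIM (what is proved, stated in full; the proofs are below) =====
def Claim_equal_text_to_bits : Prop := ∀ (text : String), Dom_text_to_bits text → Pre_text_to_bits text → Spec_text_to_bits text (text_to_bits text)

-- ===== LEMMAS AND PROOFS =====

-- the big-endian integer of a byte list (B's int.from_bytes), at the Nat level
def natFrom (l : List Nat) : Nat := l.foldl (fun a b => a * 256 + b) 0

-- A's per-byte MSB-first bits, at the Nat level
def byteBitsN (b : Nat) : List Nat :=
  [(b >>> 7) &&& 1, (b >>> 6) &&& 1, (b >>> 5) &&& 1, (b >>> 4) &&& 1,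
   (b >>> 3) &&& 1, (b >>> 2) &&& 1, (b >>> 1) &&& 1, b &&& 1]

-- the binary digits of n, MSB first, no leading zeros except for n = 0 (the value of format(n,'b'))
def binRec (n : Nat) : List Char :=
  if _h : n < 2 then [Nat.digitChar n] else binRec (n / 2) ++ [Nat.digitChar (n % 2)]
decreasing_by exact Nat.div_lt_self (by omega) (by omega)

theorem natFrom_shift (l : List Nat) : ∀ a : Nat,
    l.foldl (fun a b => a * 256 + b) a = a * 256 ^ l.length + natFrom l := by
  induction l with
  | nil => intro a; simp [natFrom]
  | cons b t ih =>
    intro a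
    simp only [List.foldl_cons, List.length_cons, natFrom, Nat.zero_mul, Nat.zero_add]
    rw [ih (a * 256 + b), ih b]
    ring

theorem natFrom_lt (l : List Nat) (h : ∀ b ∈ l, b < 256) : natFrom l < 256 ^ l.length := by
  induction l with
  | nil => simp [natFrom]
  | cons b t ih =>
    have hb : b < 256 := h b (by simp)
    have ht := ih (fun x hx => h x (by simp [hx]))
    simp only [natFrom, List.foldl_cons, List.length_cons, Nat.zero_mul, Nat.zero_add]
    rw [natFrom_shift t b]
    have hpow : 256 ^ t.length * (b + 1) ≤ 256 ^ (t.length + 1) := by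
      rw [pow_succ]
      exact Nat.mul_le_mul_left _ hb
    nlinarith [ht]

theorem pow256 (k : Nat) : (256 : Nat) ^ k = 2 ^ (8 * k) := by
  rw [show (256 : Nat) = 2 ^ 8 from rfl, ← pow_mul]

-- bit of the high byte: shifting past the whole low part reads b
theorem bit_hi (b m k j : Nat) (hm : m < 2 ^ (8 * k)) :
    (b * 2 ^ (8 * k) + m) >>> (8 * k + j) = b >>> j := by
  simp only [Nat.shiftRight_eq_div_pow]
  rw [pow_add, ← Nat.div_div_eq_div_mul]
  congr 1
  rw [Nat.add_comm, Nat.add_mul_div_right _ _ (Nat.pos_of_ne_zero (by positivity))]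
  rw [Nat.div_eq_of_lt hm]
  omega

-- bit of the low part: a shift below the low part's width ignores the high byte
theorem bit_lo (b m k s : Nat) (hs : s < 8 * k) :
    ((b * 2 ^ (8 * k) + m) >>> s) &&& 1 = (m >>> s) &&& 1 := by
  simp only [Nat.shiftRight_eq_div_pow, Nat.and_one_is_mod]
  have h1 : b * 2 ^ (8 * k) + m = 2 ^ s * (b * 2 ^ (8 * k - s)) + m := by
    rw [mul_comm (2 ^ s), mul_assoc, ← pow_add]
    congr 3
    omega
  rw [h1, Nat.mul_add_div (Nat.pos_of_ne_zero (by positivity))]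
  have h2 : b * 2 ^ (8 * k - s) = (b * 2 ^ (8 * k - s - 1)) * 2 := by
    rw [mul_assoc, ← pow_succ]
    congr 2
    omega
  omega

-- the per-bit-position pass equals the per-byte MSB-first bits
theorem natFlat_eq (data : List Nat) (h : ∀ b ∈ data, b < 256) :
    (List.range (data.length * 8)).map
      (fun i => (natFrom data >>> (data.length * 8 - 1 - i)) &&& 1)
      = data.flatMap byteBitsN := by
  induction data with
  | nil => simp
  | cons b t ih =>
    have hb : b < 256 := h b (by simp)
    have ht : ∀ x ∈ t, x < 256 := fun x hx => h x (by simp [hx])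
    have hm : natFrom t < 2 ^ (8 * t.length) := by
      rw [← pow256]; exact natFrom_lt t ht
    have hN : natFrom (b :: t) = b * 2 ^ (8 * t.length) + natFrom t := by
      simp only [natFrom, List.foldl_cons, Nat.zero_mul, Nat.zero_add]
      rw [natFrom_shift t b, ← pow256]
      rfl
    set k := t.length with hk
    have hlen : (b :: t).length * 8 = 8 + k * 8 := by simp [hk]; omega
    rw [hlen, List.range_add, List.map_append, List.map_map]
    have hfirst : (List.range 8).map
        (fun i => (natFrom (b :: t) >>> (8 + k * 8 - 1 - i)) &&& 1) = byteBitsN b := by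
      have step : ∀ i ∈ List.range 8,
          (natFrom (b :: t) >>> (8 + k * 8 - 1 - i)) &&& 1 = (b >>> (7 - i)) &&& 1 := by
        intro i hi
        have hi8 : i < 8 := List.mem_range.mp hi
        have harith : 8 + k * 8 - 1 - i = 8 * k + (7 - i) := by omega
        rw [harith, hN, bit_hi b (natFrom t) k (7 - i) hm]
      rw [List.map_congr_left step]
      simp [List.range_succ, byteBitsN]
    have hrest : (List.range (k * 8)).map
        ((fun i => (natFrom (b :: t) >>> (8 + k * 8 - 1 - i)) &&& 1) ∘ (fun x => 8 + x))
        = t.flatMap byteBitsN := by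
      have step : ∀ j ∈ List.range (k * 8),
          ((fun i => (natFrom (b :: t) >>> (8 + k * 8 - 1 - i)) &&& 1) ∘ (fun x => 8 + x)) j
            = (natFrom t >>> (k * 8 - 1 - j)) &&& 1 := by
        intro j hj
        have hjk : j < k * 8 := List.mem_range.mp hj
        simp only [Function.comp]
        have harith : 8 + k * 8 - 1 - (8 + j) = k * 8 - 1 - j := by omega
        rw [harith, hN, bit_lo b (natFrom t) k (k * 8 - 1 - j) (by omega)]
      rw [List.map_congr_left step]
      exact ih ht
    rw [hfirst, hrest, List.flatMap_cons]

-- A's inner loop over range(7,-1,-1) appends exactly the 8 MSB-first bits of the byte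
theorem innerA (byte : Nat) (bits : List Int) :
    (PySem.List.pyRange 7 (-1) (-1)).foldl
      (fun bits shift => bits ++ [(((byte >>> shift.toNat) &&& 1 : Nat) : Int)]) bits
    = bits ++ (byteBitsN byte).map (fun x : Nat => (x : Int)) := by
  show List.foldl _ bits [(7 : Int), 6, 5, 4, 3, 2, 1, 0] = _
  simp [byteBitsN, List.append_assoc]

-- A's nested foldl collapses to a flatMap of per-byte bit lists
theorem portA_flat (data : List Nat) : ∀ bits : List Int,
    data.foldl (fun bits byte =>
      (PySem.List.pyRange 7 (-1) (-1)).foldl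
        (fun bits shift => bits ++ [(((byte >>> shift.toNat) &&& 1 : Nat) : Int)]) bits) bits
    = bits ++ (data.flatMap byteBitsN).map (fun x : Nat => (x : Int)) := by
  induction data with
  | nil => intro bits; simp
  | cons b t ih =>
    intro bits
    simp only [List.foldl_cons]
    rw [innerA b bits, ih, List.flatMap_cons, List.map_append, List.append_assoc]

theorem binRec_low (n : Nat) (h : n < 2) : binRec n = [Nat.digitChar n] := by
  rw [binRec]
  simp [h]

theorem binRec_high (n : Nat) (h : ¬ n < 2) : binRec n = binRec (n / 2) ++ [Nat.digitChar (n % 2)] := by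
  rw [binRec]
  simp [h]

-- Nat.toDigits 2 (core's fuelled toDigitsCore) computes the structural recursion binRec
theorem toDigitsCore_eq_binRec : ∀ (f n : Nat) (acc : List Char), n < f →
    Nat.toDigitsCore 2 f n acc = binRec n ++ acc := by
  intro f
  induction f with
  | zero => intro n acc h; omega
  | succ f ih =>
    intro n acc h
    rw [Nat.toDigitsCore]
    by_cases h2 : n < 2
    · have hq : n / 2 = 0 := by omega
      rw [hq]
      simp only [if_true]
      rw [binRec_low n h2]
      have hm : n % 2 = n := by omega
      rw [hm]
      rfl
    · have hne : ¬ (n / 2 = 0) := by omega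
      simp only [hne, if_false]
      rw [ih (n / 2) _ (by omega), binRec_high n h2]
      simp [List.append_assoc]

theorem toDigits_eq_binRec (n : Nat) : Nat.toDigits 2 n = binRec n := by
  have h := toDigitsCore_eq_binRec (n + 1) n [] (by omega)
  simpa [Nat.toDigits] using h

-- the zero-padded binary string, read as bits, is the per-bit-position pass
theorem padded_eq_posBits : ∀ (t n : Nat), 1 ≤ t → n < 2 ^ t →
    (List.replicate (t - (binRec n).length) '0' ++ binRec n).map
        (fun c => if c = '1' then (1 : Int) else 0)
      = (List.range t).map (fun i => (((n >>> (t - 1 - i)) &&& 1 : Nat) : Int)) := by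
  intro t
  induction t with
  | zero => intro n h; omega
  | succ t ih =>
    intro n _ hn
    by_cases ht : t = 0
    · subst ht
      have h2 : n < 2 := by omega
      rw [binRec_low n h2]
      interval_cases n <;> simp [List.range_succ, Nat.digitChar]
    · -- both sides split off the last bit n &&& 1, leaving the case (t, n / 2)
      have hstep : (List.range (t + 1)).map
            (fun i => (((n >>> (t + 1 - 1 - i)) &&& 1 : Nat) : Int))
          = (List.range t).map (fun i => ((((n / 2) >>> (t - 1 - i)) &&& 1 : Nat) : Int))
            ++ [((n &&& 1 : Nat) : Int)] := by
        rw [List.range_succ, List.map_append]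
        congr 1
        · apply List.map_congr_left
          intro i hi
          have hit : i < t := List.mem_range.mp hi
          congr 2
          have e1 : t + 1 - 1 - i = t - i := by omega
          rw [e1, Nat.shiftRight_eq_div_pow, Nat.shiftRight_eq_div_pow,
            Nat.div_div_eq_div_mul]
          have e2 : (2 : Nat) * 2 ^ (t - 1 - i) = 2 ^ (t - i) := by
            rw [← pow_succ']
            congr 1
            omega
          rw [e2]
        · simp
      have hn2 : n / 2 < 2 ^ t := by
        have hp : (2 : Nat) ^ (t + 1) = 2 ^ t * 2 := pow_succ 2 t
        omega
      have key : (List.replicate (t + 1 - (binRec n).length) '0' ++ binRec n).map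
            (fun c => if c = '1' then (1 : Int) else 0)
          = (List.replicate (t - (binRec (n / 2)).length) '0' ++ binRec (n / 2)).map
              (fun c => if c = '1' then (1 : Int) else 0)
            ++ [((n &&& 1 : Nat) : Int)] := by
        by_cases h2 : n < 2
        · have hq : n / 2 = 0 := by omega
          rw [hq, binRec_low n h2, binRec_low 0 (by omega)]
          simp only [List.length_singleton]
          have hrep : List.replicate (t + 1 - 1) '0' = List.replicate (t - 1) '0' ++ ['0'] := by
            have e : t + 1 - 1 = (t - 1) + 1 := by omega
            rw [e, List.replicate_succ']
          rw [hrep]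
          interval_cases n <;> simp [Nat.digitChar, List.append_assoc]
        · conv_lhs => rw [binRec_high n h2]
          rw [List.length_append, List.length_singleton]
          have hlen : t + 1 - ((binRec (n / 2)).length + 1) = t - (binRec (n / 2)).length := by
            omega
          rw [hlen, List.map_append, List.map_append, ← List.append_assoc]
          congr 1
          · exact List.map_append.symm
          · rw [Nat.and_one_is_mod n]
            rcases Nat.mod_two_eq_zero_or_one n with hm | hm <;> rw [hm] <;> decide
      rw [key, ih (n / 2) (by omega) hn2, hstep]

theorem byte_lt (text : String) (hd : Dom_text_to_bits text) :
    ∀ b ∈ ([((text.toList.map (fun c => c.toNat)).length >>> 24) &&& 255,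
            ((text.toList.map (fun c => c.toNat)).length >>> 16) &&& 255,
            ((text.toList.map (fun c => c.toNat)).length >>> 8) &&& 255,
            (text.toList.map (fun c => c.toNat)).length &&& 255]
           ++ text.toList.map (fun c => c.toNat)), b < 256 := by
  intro b hb
  rcases List.mem_append.mp hb with hh | hp
  · fin_cases hh <;> exact Nat.lt_succ_of_le Nat.and_le_right
  · obtain ⟨c, hc, rfl⟩ := List.mem_map.mp hp
    have hch := List.all_eq_true.mp hd c hc
    simp only [pvDomChar, Bool.or_eq_true, Bool.and_eq_true, decide_eq_true_eq,
      beq_iff_eq] at hch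
    omega

-- the whole bridge, for any nonempty byte list: A's loops = B's big-int binary string
theorem bridge (data : List Nat) (h : ∀ b ∈ data, b < 256) (hne : data ≠ []) :
    data.foldl (fun bits byte =>
      (PySem.List.pyRange 7 (-1) (-1)).foldl
        (fun bits shift => bits ++ [(((byte >>> shift.toNat) &&& 1 : Nat) : Int)]) bits) []
    = (List.replicate (data.length * 8 - (Nat.toDigits 2 (data.foldl (fun acc b => acc * 256 + b) 0)).length) '0'
        ++ Nat.toDigits 2 (data.foldl (fun acc b => acc * 256 + b) 0)).map
        (fun c => if c = '1' then (1 : Int) else 0) := by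
  have hN : natFrom data < 2 ^ (data.length * 8) := by
    have := natFrom_lt data h
    rw [pow256] at this
    rwa [Nat.mul_comm 8 data.length] at this
  have ht1 : 1 ≤ data.length * 8 := by
    have : data.length ≠ 0 := fun hx => hne (List.length_eq_zero_iff.mp hx)
    omega
  have hf : data.foldl (fun acc b => acc * 256 + b) 0 = natFrom data := rfl
  rw [hf, toDigits_eq_binRec,
    padded_eq_posBits (data.length * 8) (natFrom data) ht1 hN,
    portA_flat data [], List.nil_append, ← natFlat_eq data h, List.map_map]
  rfl

-- ===== VERDICT (by name: the statement is the Claim_ definition above) =====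
theorem text_to_bits_spec : Claim_equal_text_to_bits := by
  intro text hd _
  unfold Spec_text_to_bits
  show text_to_bits text = text_to_bits_alt text
  dsimp only [text_to_bits, text_to_bits_alt]
  exact bridge _ (byte_lt text hd) (by simp)
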